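-- pv_equiv track=rewrite | github.com/YJ3003/Agentify | backend/modernization/adapters/repo_adapter.py | _identify_entrypoints
-- ===== SOURCE A (Python) =====
-- from typing import Dict, List, Any
--
-- def _identify_entrypoints(files: Dict[str, Any]) -> List[str]:
--     """
--     Heuristic: identifying likely entrypoints (main.py, app.py, index.js, etc.)
--     """
--     candidates = ["main.py", "app.py", "index.py", "wsgi.py", "manage.py", "index.js", "server.js"]
--     found = []
--     for f in files.keys():
--         if f.lower() in candidates:
--             found.append(f)
--
--     # If no obvious candidates, return all files if small count, else top complexity
--     if not found and files:
--         # Sort by complexity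
--         sorted_files = sorted(files.items(), key=lambda x: x[1].get("complexity", 0), reverse=True)
--         if sorted_files:
--             found.append(sorted_files[0][0])
--
--     return found
-- ===== SOURCE B (Python) =====
-- from typing import Dict, List, Any
--
-- def _identify_entrypoints(files: Dict[str, Any]) -> List[str]:
--     """
--     Heuristic: identifying likely entrypoints (main.py, app.py, index.js, etc.)
--     """
--     candidates = ["main.py", "app.py", "index.py", "wsgi.py", "manage.py", "index.js", "server.js"]
--     # One combined pass: collect candidate names and track the top-complexity
--     # file simultaneously; no sort, no second scan in the fallback.
--     found = []
--     best = None  # (name, complexity) of the first maximal file seen so far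
--     for name, info in files.items():
--         if name.lower() in candidates:
--             found.append(name)
--         c = info.get("complexity", 0)
--         if best is None or best[1] < c:
--             best = (name, c)
--     if found:
--         return found
--     return [best[0]] if best is not None else []
-- ===== Notes on version B (the rewrite author's own statement) =====
-- stated objective: alternative
-- what changed: B makes one combined pass that collects candidate names and tracks the first-maximal-complexity file in a running (name, complexity) accumulator, replacing A's candidate loop followed by a full sort-by-complexity-descending and taking index 0 in the fallback.
import Mathlib
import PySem

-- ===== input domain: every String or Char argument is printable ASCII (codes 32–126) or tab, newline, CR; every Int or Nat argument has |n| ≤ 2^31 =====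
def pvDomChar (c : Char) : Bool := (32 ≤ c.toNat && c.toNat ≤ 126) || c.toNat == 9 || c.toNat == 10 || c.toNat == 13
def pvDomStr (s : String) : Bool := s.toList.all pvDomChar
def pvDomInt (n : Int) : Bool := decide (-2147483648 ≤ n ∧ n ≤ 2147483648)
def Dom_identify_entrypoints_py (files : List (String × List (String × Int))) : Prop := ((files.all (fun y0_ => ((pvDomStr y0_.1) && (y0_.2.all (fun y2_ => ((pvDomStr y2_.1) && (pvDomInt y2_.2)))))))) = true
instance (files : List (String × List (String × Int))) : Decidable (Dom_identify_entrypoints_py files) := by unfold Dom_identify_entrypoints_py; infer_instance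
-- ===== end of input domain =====

-- B folds once over the files with a (found, running-best) pair accumulator instead of A's candidate loop plus sort-descending-take-head fallback (alternative one-pass algorithm, not claimed faster).


-- ===== PORT A =====
def identify_entrypoints_py (files : List (String × List (String × Int))) : List String :=
  let candidates : List String := ["main.py", "app.py", "index.py", "wsgi.py", "manage.py", "index.js", "server.js"]
  let found : List String :=
    files.foldl (fun acc p => if candidates.contains (PySem.Str.lower p.1) then acc ++ [p.1] else acc) []
  if found = [] ∧ files ≠ [] then
    let sorted_files := PySem.List.sorted files (fun x => PySem.Dict.getD ⟨x.2⟩ "complexity" (0 : Int)) true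
    match sorted_files with
    | [] => found
    | m :: _ => found ++ [m.1]
  else found

-- ===== PORT B =====
def identify_entrypoints_py_alt (files : List (String × List (String × Int))) : List String :=
  let candidates : List String := ["main.py", "app.py", "index.py", "wsgi.py", "manage.py", "index.js", "server.js"]
  -- one combined pass: (found so far, first-maximal (name, complexity) so far)
  let st : List String × Option (String × Int) :=
    files.foldl (fun st p =>
      ((if candidates.contains (PySem.Str.lower p.1) then st.1 ++ [p.1] else st.1),
       (match st.2 with
        | none => some (p.1, PySem.Dict.getD ⟨p.2⟩ "complexity" (0 : Int))
        | some b => if b.2 < PySem.Dict.getD ⟨p.2⟩ "complexity" (0 : Int)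
                    then some (p.1, PySem.Dict.getD ⟨p.2⟩ "complexity" (0 : Int))
                    else some b))) ([], none)
  if st.1 ≠ [] then st.1
  else match st.2 with
       | none => []
       | some b => [b.1]

-- ===== PRECONDITION & SPEC =====
def Spec_identify_entrypoints_py (files : List (String × List (String × Int))) (out : List String) : Prop := out = identify_entrypoints_py_alt files
instance (files : List (String × List (String × Int))) (out : List String) : Decidable (Spec_identify_entrypoints_py files out) := by unfold Spec_identify_entrypoints_py; infer_instance

-- ===== CLAIM (what is proved, stated in full; the proofs are below) =====
def Claim_equal_identify_entrypoints_py : Prop := ∀ (files : List (String × List (String × Int))), Dom_identify_entrypoints_py files → Spec_identify_entrypoints_py files (identify_entrypoints_py files)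

-- ===== LEMMAS AND PROOFS =====

-- inserting into a list changes its head exactly like one running-max step
theorem pv_head?_insertBy {α : Type} (before : α → α → Bool) (x : α) (ys : List α) :
    (PySem.List.insertBy before x ys).head? =
      (match ys.head? with
       | none => some x
       | some y => if before x y then some x else some y) := by
  cases ys with
  | nil => rfl
  | cons y t =>
      show (if before x y then x :: y :: t else y :: PySem.List.insertBy before x t).head? = _
      by_cases h : before x y = true <;> simp [h]

-- head of the insertion-sort fold is the running-max fold
theorem pv_head?_foldl_insertBy {α : Type} (before : α → α → Bool) (l : List α) (acc : List α) :
    (l.foldl (fun a x => PySem.List.insertBy before x a) acc).head? =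
      l.foldl (fun o x =>
        (match o with
         | none => some x
         | some m => if before x m then some x else some m)) acc.head? := by
  induction l generalizing acc with
  | nil => rfl
  | cons x t ih =>
      simp only [List.foldl]
      rw [ih, pv_head?_insertBy]

-- head of sorted(…, reverse=True) is the first maximal element, i.e. max?
theorem pv_head?_sorted_rev {α : Type} (xs : List α) (key : α → Int) :
    (PySem.List.sorted xs key true).head? = PySem.List.max? xs key := by
  unfold PySem.List.sorted PySem.List.max?
  rw [pv_head?_foldl_insertBy]
  simp only [List.head?_nil]
  congr 1
  funext o x
  cases o with
  | none => rfl
  | some m => simp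

-- B's combined pair fold is A's found-fold paired with the running max? fold
-- (B stores (name, key); g projects an item to that pair and preserves the comparison)
theorem pv_alt_fold (cand : List String) (key : (String × List (String × Int)) → Int)
    (l : List (String × List (String × Int))) (f0 : List String)
    (o0 : Option (String × List (String × Int))) :
    l.foldl (fun (st : List String × Option (String × Int)) p =>
        ((if cand.contains (PySem.Str.lower p.1) then st.1 ++ [p.1] else st.1),
         (match st.2 with
          | none => some (p.1, key p)
          | some b => if b.2 < key p then some (p.1, key p) else some b)))
      (f0, Option.map (fun m => (m.1, key m)) o0) =
    (l.foldl (fun acc p => if cand.contains (PySem.Str.lower p.1) then acc ++ [p.1] else acc) f0,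
     Option.map (fun m => (m.1, key m))
       (l.foldl (fun o x =>
          (match o with
           | none => some x
           | some m => if key m < key x then some x else some m)) o0)) := by
  induction l generalizing f0 o0 with
  | nil => rfl
  | cons x t ih =>
      simp only [List.foldl]
      rw [← ih]
      congr 1
      cases o0 with
      | none => rfl
      | some m =>
          simp only [Option.map_some]
          by_cases h : key m < key x <;> simp [h]

-- ===== VERDICT (by name: the statement is the Claim_ definition above) =====
theorem identify_entrypoints_py_spec : Claim_equal_identify_entrypoints_py := by
  intro files _
  simp only [Spec_identify_entrypoints_py, identify_entrypoints_py, identify_entrypoints_py_alt]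
  set cand : List String := ["main.py", "app.py", "index.py", "wsgi.py", "manage.py", "index.js", "server.js"] with hcand
  have hfold := pv_alt_fold cand (fun x => PySem.Dict.getD ⟨x.2⟩ "complexity" (0 : Int)) files [] none
  simp only [Option.map_none] at hfold
  rw [hfold]
  have hmax : PySem.List.max? files (fun x => PySem.Dict.getD ⟨x.2⟩ "complexity" (0 : Int)) =
      files.foldl (fun o x =>
        (match o with
         | none => some x
         | some m => if (fun x => PySem.Dict.getD ⟨x.2⟩ "complexity" (0 : Int)) m < (fun x => PySem.Dict.getD ⟨x.2⟩ "complexity" (0 : Int)) x then some x else some m)) none := by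
    simp only [PySem.List.max?]
    congr 1
    funext o x
    cases o <;> rfl
  set found := files.foldl (fun acc p => if cand.contains (PySem.Str.lower p.1) then acc ++ [p.1] else acc) [] with hfound
  by_cases hf : found = []
  · by_cases hne : files = []
    · subst hne
      simp
    · rw [if_pos ⟨hf, hne⟩]
      have hhead := pv_head?_sorted_rev files (fun x => PySem.Dict.getD ⟨x.2⟩ "complexity" (0 : Int))
      cases hs : PySem.List.sorted files (fun x => PySem.Dict.getD ⟨x.2⟩ "complexity" (0 : Int)) true with
      | nil => exact absurd ((PySem.List.sorted_eq_nil_iff _ _ _).mp hs) hne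
      | cons m t =>
          rw [hs] at hhead
          simp only [List.head?] at hhead
          rw [hf, ← hmax, ← hhead]
          simp
  · rw [if_neg (fun h => hf h.1), if_pos hf]
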